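-- pv_equiv track=rewrite | github.com/Spruked/GOAT | backend/app/core/content_ai.py | _simple_keywords
-- ===== SOURCE A (Python) =====
-- from typing import Dict, List
--
-- def _simple_keywords(text: str, limit: int = 5) -> List[str]:
--     if not text:
--         return []
--     words = [w.strip('.,!?:;()"\'') for w in text.split()]
--     candidates = [w for w in words if len(w) > 4]
--     seen = []
--     for w in candidates:
--         lw = w.lower()
--         if lw not in seen:
--             seen.append(lw)
--         if len(seen) >= limit:
--             break
--     return seen
-- ===== SOURCE B (Python) =====
-- def _simple_keywords(text: str, limit: int = 5):
--     def go(ws, need, seen):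
--         if need <= 0 or not ws:
--             return []
--         w = ws[0].strip('.,!?:;()"\'')
--         lw = w.lower()
--         if len(w) > 4 and lw not in seen:
--             return [lw] + go(ws[1:], need - 1, seen | {lw})
--         return go(ws[1:], need, seen)
--     return go(text.split(), limit, set())
-- ===== Notes on version B (the rewrite author's own statement) =====
-- stated objective: alternative
-- what changed: Replaced A's three staged list comprehensions plus an accumulator loop (seen list grown in place, length checked against limit, early break, seen returned) by a single recursive pass over the raw word list that strips/filters inline, counts DOWN a remaining-keywords counter, keeps membership in a set, and builds the output front-to-back with cons.
-- intended difference: For limit <= 0 with at least one stripped word longer than 4 characters, A still returns a one-element list (leftover loop state appended before the break check fires), while B returns the empty list, the intended result when at most zero keywords are requested. — e.g. on _simple_keywords("aaaaa bbbbb", 0): A returns ["aaaaa"], B returns []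
import Mathlib
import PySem

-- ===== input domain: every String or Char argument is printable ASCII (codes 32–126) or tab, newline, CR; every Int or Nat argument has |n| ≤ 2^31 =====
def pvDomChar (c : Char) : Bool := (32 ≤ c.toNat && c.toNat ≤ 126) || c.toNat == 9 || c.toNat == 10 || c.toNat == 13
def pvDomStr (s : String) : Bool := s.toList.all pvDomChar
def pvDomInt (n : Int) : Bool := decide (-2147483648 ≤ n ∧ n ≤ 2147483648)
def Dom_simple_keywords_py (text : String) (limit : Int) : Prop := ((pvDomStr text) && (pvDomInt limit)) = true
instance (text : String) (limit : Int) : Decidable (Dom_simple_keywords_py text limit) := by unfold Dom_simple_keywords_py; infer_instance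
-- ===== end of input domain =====

-- B replaces A's staged comprehensions + accumulator loop by one recursive pass that
-- strips/filters inline, counts down a remaining counter and conses the output (objective:
-- alternative); for limit ≤ 0 with a long candidate word A returns one keyword, B returns []
-- (see D_ below).



-- ===== PORT A =====
-- A's for-loop over candidates: conditional append after membership test, early break at limit
def pvLoopA (limit : Int) : List String → List String → List String
  | [], seen => seen
  | w :: rest, seen =>
      let lw := PySem.Str.lower w
      let seen' := if seen.contains lw then seen else seen ++ [lw]
      if (seen'.length : Int) ≥ limit then seen' else pvLoopA limit rest seen'

def simple_keywords_py (text : String) (limit : Int) : List String :=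
  if text = "" then []
  else
    let words := (PySem.Str.split₀ text).map (fun w => PySem.Str.stripChars w ".,!?:;()\"'")
    let candidates := words.filter (fun w => PySem.Str.len w > 4)
    pvLoopA limit candidates []

-- ===== PORT B =====
-- B's inner recursion go(ws, need, seen)
def pvGoB : List String → Int → PySem.Set String → List String
  | [], _, _ => []
  | w0 :: rest, need, seen =>
      if need ≤ 0 then []
      else
        let w := PySem.Str.stripChars w0 ".,!?:;()\"'"
        let lw := PySem.Str.lower w
        if PySem.Str.len w > 4 && !(PySem.Set.contains seen lw) then
          lw :: pvGoB rest (need - 1) (PySem.Set.add seen lw)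
        else pvGoB rest need seen

def simple_keywords_py_alt (text : String) (limit : Int) : List String :=
  pvGoB (PySem.Str.split₀ text) limit PySem.Set.empty

-- ===== PRECONDITION & SPEC =====
-- For limit ≤ 0 with at least one stripped word longer than 4 characters, A still returns a
-- one-element list (leftover loop state appended before the break check fires); B returns [],
-- the intended result when at most zero keywords are requested.
def D_simple_keywords_py (text : String) (limit : Int) : Prop :=
  limit ≤ 0 ∧ ∃ w ∈ PySem.Str.split₀ text, PySem.Str.len (PySem.Str.stripChars w ".,!?:;()\"'") > 4
instance (text : String) (limit : Int) : Decidable (D_simple_keywords_py text limit) := by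
  unfold D_simple_keywords_py; infer_instance

def Spec_simple_keywords_py (text : String) (limit : Int) (out : List String) : Prop :=
  ¬ D_simple_keywords_py text limit → out = simple_keywords_py_alt text limit
instance (text : String) (limit : Int) (out : List String) : Decidable (Spec_simple_keywords_py text limit out) := by
  unfold Spec_simple_keywords_py; infer_instance

def pvDiffWitness_simple_keywords_py : String × Int := ("aaaaa bbbbb", 0)
def pvDiffWitnessOut_simple_keywords_py : (List String) × (List String) := (["aaaaa"], [])

-- ===== CLAIM =====
def Claim_unchanged_simple_keywords_py : Prop := ∀ (text : String) (limit : Int), Dom_simple_keywords_py text limit → Spec_simple_keywords_py text limit (simple_keywords_py text limit)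
def Claim_changed_simple_keywords_py : Prop := Dom_simple_keywords_py (pvDiffWitness_simple_keywords_py.1) (pvDiffWitness_simple_keywords_py.2) ∧ D_simple_keywords_py (pvDiffWitness_simple_keywords_py.1) (pvDiffWitness_simple_keywords_py.2) ∧ simple_keywords_py (pvDiffWitness_simple_keywords_py.1) (pvDiffWitness_simple_keywords_py.2) = pvDiffWitnessOut_simple_keywords_py.1 ∧ simple_keywords_py_alt (pvDiffWitness_simple_keywords_py.1) (pvDiffWitness_simple_keywords_py.2) = pvDiffWitnessOut_simple_keywords_py.2 ∧ pvDiffWitnessOut_simple_keywords_py.1 ≠ pvDiffWitnessOut_simple_keywords_py.2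
def Claim_exact_simple_keywords_py : Prop := ∀ (text : String) (limit : Int), Dom_simple_keywords_py text limit → D_simple_keywords_py text limit → simple_keywords_py text limit ≠ simple_keywords_py_alt text limit

-- ===== LEMMAS AND PROOFS =====

-- with no keywords left to emit, B's recursion returns []
theorem pvGoB_nonpos (ws : List String) (need : Int) (seen : PySem.Set String)
    (h : need ≤ 0) : pvGoB ws need seen = [] := by
  cases ws with
  | nil => rfl
  | cons w rest => rw [pvGoB, if_pos h]

-- core correspondence: A's loop over the filtered candidates, started in state seen below the
-- limit, returns seen followed by B's recursion over the raw words with the remaining count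
theorem pvLoopA_eq_goB (limit : Int) (ws : List String) :
    ∀ seen : List String, (seen.length : Int) < limit →
      pvLoopA limit ((ws.map (fun w => PySem.Str.stripChars w ".,!?:;()\"'")).filter
          (fun w => PySem.Str.len w > 4)) seen
        = seen ++ pvGoB ws (limit - seen.length) seen := by
  induction ws with
  | nil => intro seen h; simp [pvLoopA, pvGoB]
  | cons w0 rest ih =>
      intro seen h
      have hpos : ¬ (limit - (seen.length : Int) ≤ 0) := by omega
      rw [List.map_cons, List.filter_cons, pvGoB, if_neg hpos]
      by_cases hlen : PySem.Str.len (PySem.Str.stripChars w0 ".,!?:;()\"'") > 4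
      · rw [if_pos (by simpa using hlen)]
        rw [pvLoopA]
        by_cases hmem : PySem.Str.lower (PySem.Str.stripChars w0 ".,!?:;()\"'") ∈ seen
        · have h1 : seen.contains (PySem.Str.lower (PySem.Str.stripChars w0 ".,!?:;()\"'")) = true := by
            simpa using hmem
          have h2 : (decide (PySem.Str.len (PySem.Str.stripChars w0 ".,!?:;()\"'") > 4) &&
              !(PySem.Set.contains seen (PySem.Str.lower (PySem.Str.stripChars w0 ".,!?:;()\"'")))) = false := by
            simp [PySem.Set.contains, hmem]
          simp only [h1, if_true, h2, Bool.false_eq_true, if_false]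
          rw [if_neg (by omega)]
          exact ih seen h
        · have h1 : seen.contains (PySem.Str.lower (PySem.Str.stripChars w0 ".,!?:;()\"'")) = false := by
            simpa using hmem
          have h2 : (decide (PySem.Str.len (PySem.Str.stripChars w0 ".,!?:;()\"'") > 4) &&
              !(PySem.Set.contains seen (PySem.Str.lower (PySem.Str.stripChars w0 ".,!?:;()\"'")))) = true := by
            simp only [Bool.and_eq_true, decide_eq_true_eq, Bool.not_eq_true']
            refine ⟨hlen, ?_⟩
            simp [PySem.Set.contains, hmem]
          have hadd : PySem.Set.add seen (PySem.Str.lower (PySem.Str.stripChars w0 ".,!?:;()\"'"))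
              = seen ++ [PySem.Str.lower (PySem.Str.stripChars w0 ".,!?:;()\"'")] := by
            unfold PySem.Set.add PySem.Set.contains
            rw [if_neg (by simpa using hmem)]
          simp only [h1, Bool.false_eq_true, if_false, h2, if_true]
          have hl : (seen ++ [PySem.Str.lower (PySem.Str.stripChars w0 ".,!?:;()\"'")]).length
              = seen.length + 1 := by simp
          by_cases hbreak : ((seen ++ [PySem.Str.lower (PySem.Str.stripChars w0 ".,!?:;()\"'")]).length : Int) ≥ limit
          · rw [if_pos hbreak]
            have hz : limit - (seen.length : Int) - 1 ≤ 0 := by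
              rw [hl] at hbreak; push_cast at hbreak; omega
            rw [pvGoB_nonpos rest _ _ hz]
          · rw [if_neg hbreak]
            have hlt : (((seen ++ [PySem.Str.lower (PySem.Str.stripChars w0 ".,!?:;()\"'")]).length : Int)) < limit := by
              omega
            rw [ih _ hlt, hadd]
            have hrem : limit - (((seen ++ [PySem.Str.lower (PySem.Str.stripChars w0 ".,!?:;()\"'")]).length : Int))
                = limit - (seen.length : Int) - 1 := by
              rw [hl]; push_cast; ring
            rw [hrem]
            simp
      · rw [if_neg (by simpa using hlen)]
        have h2 : (decide (PySem.Str.len (PySem.Str.stripChars w0 ".,!?:;()\"'") > 4) &&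
            !(PySem.Set.contains seen (PySem.Str.lower (PySem.Str.stripChars w0 ".,!?:;()\"'")))) = false := by
          simp only [Bool.and_eq_false_iff, decide_eq_false_iff_not]
          left; exact hlen
        simp only [h2, Bool.false_eq_true, if_false]
        exact ih seen h

theorem simple_keywords_py_spec : Claim_unchanged_simple_keywords_py := by
  unfold Claim_unchanged_simple_keywords_py
  intro text limit _ hnd
  simp only [simple_keywords_py, simple_keywords_py_alt]
  by_cases hpos : (0 : Int) < limit
  · split
    · rename_i he; subst he
      rw [show PySem.Str.split₀ "" = [] from rfl, pvGoB]
    · have := pvLoopA_eq_goB limit (PySem.Str.split₀ text) [] (by simpa using hpos)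
      simpa [PySem.Set.empty] using this
  · -- limit ≤ 0 and no long candidate (else D_ would hold)
    push Not at hpos
    rcases Decidable.not_and_iff_not_or_not.mp hnd with h | hnone
    · omega
    · push Not at hnone
      rw [pvGoB_nonpos _ _ _ hpos]
      have hfil : (((PySem.Str.split₀ text).map (fun w => PySem.Str.stripChars w ".,!?:;()\"'")).filter
          (fun w => PySem.Str.len w > 4)) = [] := by
        rw [List.filter_eq_nil_iff]
        intro v hv
        obtain ⟨w, hw, rfl⟩ := List.mem_map.mp hv
        simpa using hnone w hw
      split
      · rfl
      · rw [hfil]; rfl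

theorem simple_keywords_py_changed : Claim_changed_simple_keywords_py := by
  unfold Claim_changed_simple_keywords_py; decide

theorem simple_keywords_py_tight : Claim_exact_simple_keywords_py := by
  unfold Claim_exact_simple_keywords_py
  intro text limit _ hd
  obtain ⟨hle, w, hw, hlen⟩ := hd
  simp only [simple_keywords_py, simple_keywords_py_alt]
  rw [pvGoB_nonpos _ _ _ hle]
  have hne : text ≠ "" := by
    intro he; subst he
    simp [show PySem.Str.split₀ "" = [] from rfl] at hw
  rw [if_neg hne]
  have hmem : PySem.Str.stripChars w ".,!?:;()\"'" ∈
      (((PySem.Str.split₀ text).map (fun w => PySem.Str.stripChars w ".,!?:;()\"'")).filter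
        (fun w => PySem.Str.len w > 4)) := by
    rw [List.mem_filter]
    exact ⟨List.mem_map.mpr ⟨w, hw, rfl⟩, by simpa using hlen⟩
  rcases hcs : (((PySem.Str.split₀ text).map (fun w => PySem.Str.stripChars w ".,!?:;()\"'")).filter
        (fun w => PySem.Str.len w > 4)) with _ | ⟨c, cs⟩
  · rw [hcs] at hmem; simp at hmem
  · rw [pvLoopA]
    simp only [List.contains_eq_mem, List.not_mem_nil, decide_false, Bool.false_eq_true, if_false,
      List.nil_append]
    rw [if_pos (by simpa using hle.trans (by norm_num))]
    simp
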